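-- pv_equiv track=rewrite | github.com/mojomast/devussy | src/validation_helpers.py | validate_requesty_model
-- ===== SOURCE A (Python) =====
-- def validate_requesty_model(model: str) -> bool:
--     """Validate if model is allowed by Requesty API.
--
--     Requesty blocks certain providers/models:
--     - OpenAI: GPT-4o, GPT-4o-mini, GPT-5, GPT-5-mini
--     - Anthropic: All Claude models
--     - Google: All Gemini models
--
--     Args:
--         model: Model identifier (e.g., "openai/gpt-4o-mini")
--
--     Returns:
--         True if model is allowed, False otherwise
--     """
--     if "/" not in model:
--         return False
--
--     provider, model_name = model.split("/", 1)
--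
--     # Requesty blocked models (as per documentation)
--     blocked_combinations = [
--         ("openai", "gpt-4o"),
--         ("openai", "gpt-4o-mini"),
--         ("openai", "gpt-5"),
--         ("openai", "gpt-5-mini"),
--         ("anthropic", "claude-3-opus"),
--         ("anthropic", "claude-3-sonnet"),
--         ("anthropic", "claude-3-haiku"),
--         ("google", "gemini-pro"),
--         ("google", "gemini-pro-vision"),
--     ]
--
--     for blocked_provider, blocked_model in blocked_combinations:
--         if provider.lower() == blocked_provider.lower() and model_name.lower().startswith(blocked_model.lower()):
--             return False
--
--     return True
-- ===== SOURCE B (Python) =====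
-- # Instead of splitting at the separator and scanning per-provider pairs, test the whole
-- # lowercased string against the six full blocked-model strings in one shot.
-- # The redundant prefixes (gpt-4o-mini, gpt-5-mini, gemini-pro-vision) are
-- # dropped: anything starting with them already starts with gpt-4o / gpt-5 /
-- # gemini-pro. Matching a full prefix pins the provider exactly, because
-- # the provider part of a prefix has no slash, so the first slash of the model
-- # is the one inside the prefix.
-- _BLOCKED_FULL = (
--     "openai/gpt-4o",
--     "openai/gpt-5",
--     "anthropic/claude-3-opus",
--     "anthropic/claude-3-sonnet",
--     "anthropic/claude-3-haiku",
--     "google/gemini-pro",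
-- )
--
--
-- def validate_requesty_model(model: str) -> bool:
--     return "/" in model and not model.lower().startswith(_BLOCKED_FULL)
-- ===== Notes on version B (the rewrite author's own statement) =====
-- stated objective: simpler
-- what changed: Removes the split into provider/model_name and the scan over nine (provider, prefix) pairs entirely: B tests the whole lowercased string once against six full blocked-model strings (provider and prefix joined by the separator) (the three '-mini'/'-vision' prefixes are redundant because they extend another blocked prefix), reducing the function to a one-line separator-membership test plus one tuple startswith.
import Mathlib
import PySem

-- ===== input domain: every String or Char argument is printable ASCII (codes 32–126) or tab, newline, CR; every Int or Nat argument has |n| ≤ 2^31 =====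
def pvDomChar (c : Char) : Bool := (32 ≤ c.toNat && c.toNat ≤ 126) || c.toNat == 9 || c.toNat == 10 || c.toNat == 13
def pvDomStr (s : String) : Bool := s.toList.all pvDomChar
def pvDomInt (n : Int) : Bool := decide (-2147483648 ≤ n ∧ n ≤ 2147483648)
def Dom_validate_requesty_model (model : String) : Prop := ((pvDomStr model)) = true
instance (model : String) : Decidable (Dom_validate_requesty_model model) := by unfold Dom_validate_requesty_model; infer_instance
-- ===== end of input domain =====

-- B removes A's split and nine-pair scan: it tests the whole lowercased string once against
-- six full blocked-model strings (three of A's prefixes extend another and are redundant);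
-- objective: simpler.

-- ===== PORT A =====
-- the literal list of blocked (provider, model-prefix) pairs from A
def pvBlockedCombinations : List (String × String) :=
  [("openai", "gpt-4o"), ("openai", "gpt-4o-mini"), ("openai", "gpt-5"), ("openai", "gpt-5-mini"),
   ("anthropic", "claude-3-opus"), ("anthropic", "claude-3-sonnet"), ("anthropic", "claude-3-haiku"),
   ("google", "gemini-pro"), ("google", "gemini-pro-vision")]

-- A's for-loop with early return False, as structural recursion over the pair list
def pvScanA (provider modelName : String) : List (String × String) → Bool
  | [] => true
  | (bp, bm) :: rest =>
      if PySem.Str.lower provider == PySem.Str.lower bp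
          && PySem.Str.startswith (PySem.Str.lower modelName) (PySem.Str.lower bm) then false
      else pvScanA provider modelName rest

def validate_requesty_model (model : String) : Bool :=
  if !(PySem.Str.isIn "/" model) then false
  else
    match PySem.Str.splitMax? model "/" 1 with
    | some (provider :: modelName :: _) => pvScanA provider modelName pvBlockedCombinations
    | _ => false   -- unreachable: split with "/" present yields two pieces

-- ===== PORT B =====
-- B's tuple of full blocked "provider/prefix" strings
def pvBlockedFull : List String :=
  ["openai/gpt-4o", "openai/gpt-5", "anthropic/claude-3-opus",
   "anthropic/claude-3-sonnet", "anthropic/claude-3-haiku", "google/gemini-pro"]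

-- '"/" in model and not model.lower().startswith(_BLOCKED_FULL)' (tuple startswith = any)
def validate_requesty_model_alt (model : String) : Bool :=
  PySem.Str.isIn "/" model
    && !(pvBlockedFull.any (fun p => PySem.Str.startswith (PySem.Str.lower model) p))

-- ===== PRECONDITION & SPEC =====
def Spec_validate_requesty_model (model : String) (out : Bool) : Prop := out = validate_requesty_model_alt model
instance (model : String) (out : Bool) : Decidable (Spec_validate_requesty_model model out) := by unfold Spec_validate_requesty_model; infer_instance

-- ===== CLAIM (what is proved, stated in full; the proofs are below) =====
def Claim_equal_validate_requesty_model : Prop := ∀ (model : String), Dom_validate_requesty_model model → Spec_validate_requesty_model model (validate_requesty_model model)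

-- ===== LEMMAS AND PROOFS =====

-- lowerChar moves nothing onto '/': only '/' lowers to '/'
theorem pvLowerChar_slash (c : Char) (h : PySem.Chars.lowerChar c = '/') : c = '/' := by
  unfold PySem.Chars.lowerChar PySem.Chars.isupper at h
  split at h
  · next hu =>
    rw [Bool.and_eq_true, decide_eq_true_iff, decide_eq_true_iff] at hu
    have h65 : 65 ≤ c.toNat := by
      have := hu.1
      rw [Char.le_def, UInt32.le_iff_toNat_le] at this
      exact this
    have h90 : c.toNat ≤ 90 := by
      have := hu.2
      rw [Char.le_def, UInt32.le_iff_toNat_le] at this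
      exact this
    have h2 := congrArg Char.toNat h
    rw [Char.toNat_ofNat, if_pos (by unfold Nat.isValidChar; left; omega)] at h2
    have h3 : c.toNat + 32 = 47 := h2
    omega
  · exact h

-- '/' stays absent under lower
theorem pvSlash_not_mem_lower (p : List Char) (hp : '/' ∉ p) : '/' ∉ PySem.Chars.lower p := by
  intro h
  rcases List.mem_map.mp h with ⟨c, hc, hlc⟩
  exact hp (pvLowerChar_slash c hlc ▸ hc)

-- lower distributes over the '/' join
theorem pvLower_join (p n : List Char) :
    PySem.Chars.lower (p ++ '/' :: n) = PySem.Chars.lower p ++ '/' :: PySem.Chars.lower n := by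
  simp [PySem.Chars.lower]
  decide

-- key prefix fact: with '/' absent from both provider parts, a full-string prefix test
-- decomposes into provider equality plus a model-name prefix test
theorem pvPrefKey (y b x n : List Char) (hy : '/' ∉ y) (hx : '/' ∉ x) :
    List.isPrefixOf (y ++ '/' :: b) (x ++ '/' :: n) = (y == x && List.isPrefixOf b n) := by
  induction y generalizing x with
  | nil =>
    cases x with
    | nil => simp
    | cons c x' =>
      have : ¬ ('/' = c) := fun e => hx (by simp [← e])
      simp [List.isPrefixOf, this]
  | cons d y' ih =>
    have hd : d ≠ '/' := fun e => hy (by simp [e])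
    have hy' : '/' ∉ y' := fun e => hy (by simp [e])
    cases x with
    | nil => simp [List.isPrefixOf, hd]
    | cons c x' =>
      have hx' : '/' ∉ x' := fun e => hx (by simp [e])
      by_cases hdc : d = c
      · subst hdc
        simp [ih x' hy' hx']
      · have : (d == c) = false := beq_false_of_ne hdc
        simp [List.isPrefixOf, this]

-- a prefix test against an extended pattern implies the test against the pattern
theorem pvPref_mono (a ext n : List Char) (h : List.isPrefixOf (a ++ ext) n = true) :
    List.isPrefixOf a n = true := by
  rw [List.isPrefixOf_iff_prefix] at h ⊢
  exact (List.prefix_append a ext).trans h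

-- m = 0: the go loop returns the rest as the last piece
theorem pvGo0 (fuel : Nat) (l cur : List Char) (acc : List (List Char)) :
    PySem.Chars.splitOnMax.go ['/'] fuel 0 l cur acc = ((cur.reverse ++ l) :: acc).reverse := by
  cases fuel with
  | zero => simp [PySem.Chars.splitOnMax.go]
  | succ f => cases l <;> simp [PySem.Chars.splitOnMax.go]

-- maxsplit = 1: go splits at the first '/' if any
theorem pvGo1 (fuel : Nat) : ∀ (l cur : List Char) (acc : List (List Char)), l.length < fuel →
    PySem.Chars.splitOnMax.go ['/'] fuel 1 l cur acc =
      if '/' ∈ l then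
        acc.reverse ++ [cur.reverse ++ l.takeWhile (· != '/'), (l.dropWhile (· != '/')).tail]
      else acc.reverse ++ [cur.reverse ++ l] := by
  induction fuel with
  | zero => intro l cur acc h; omega
  | succ f ih =>
    intro l cur acc h
    cases l with
    | nil => simp [PySem.Chars.splitOnMax.go]
    | cons c rest =>
      by_cases hc : c = '/'
      · subst hc
        simp [PySem.Chars.splitOnMax.go, List.isPrefixOf, pvGo0]
      · have hcs : ¬ ('/' = c) := fun e => hc e.symm
        simp only [List.length_cons] at h
        rw [show PySem.Chars.splitOnMax.go ['/'] (f + 1) 1 (c :: rest) cur acc =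
              PySem.Chars.splitOnMax.go ['/'] f 1 rest (c :: cur) acc from by
            simp [PySem.Chars.splitOnMax.go, List.isPrefixOf, beq_false_of_ne hcs]]
        rw [ih rest (c :: cur) acc (by omega)]
        by_cases hm : '/' ∈ rest <;> simp [hm, hc, hcs]

-- structure of the split input: take/drop around the first '/'
theorem pvSplit_shape (s : List Char) (h : '/' ∈ s) :
    s = s.takeWhile (· != '/') ++ '/' :: (s.dropWhile (· != '/')).tail ∧
      '/' ∉ s.takeWhile (· != '/') := by
  have hne : s.dropWhile (· != '/') ≠ [] := by
    intro e
    rw [List.dropWhile_eq_nil_iff] at e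
    simpa using e '/' h
  have hh : (s.dropWhile (· != '/')).head hne = '/' := by
    have := List.head_dropWhile_not (· != '/') hne
    simpa using this
  refine ⟨?_, ?_⟩
  · have hdw : s.dropWhile (· != '/') = '/' :: (s.dropWhile (· != '/')).tail := by
      conv_lhs => rw [← List.cons_head_tail hne]
      rw [hh]
    conv_lhs => rw [← List.takeWhile_append_dropWhile (p := (· != '/')) (l := s), hdw]
  · intro hmem
    have := List.mem_takeWhile_imp hmem
    simp at this

-- the nine-condition if-chain equals the negated six-term disjunction, given the
-- three redundancy implications (a Bool tautology, checked by decide)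
theorem pvChain : ∀ (a1 a2 a3 b1 b2 b3 b4 b5 b6 b7 b8 b9 : Bool),
    (b2 = true → b1 = true) → (b4 = true → b3 = true) → (b9 = true → b8 = true) →
    (if a1 && b1 then false else if a1 && b2 then false else if a1 && b3 then false
     else if a1 && b4 then false else if a2 && b5 then false else if a2 && b6 then false
     else if a2 && b7 then false else if a3 && b8 then false else if a3 && b9 then false
     else true)
    = !(a1 && b1 || (a1 && b3 || (a2 && b5 || (a2 && b6 || (a2 && b7 || (a3 && b8 || false)))))) := by
  decide

-- .lower() is the identity on the twelve (already lowercase) literals of A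
theorem pvL1 : PySem.Str.lower "openai" = "openai" := by decide
theorem pvL2 : PySem.Str.lower "anthropic" = "anthropic" := by decide
theorem pvL3 : PySem.Str.lower "google" = "google" := by decide
theorem pvL4 : PySem.Str.lower "gpt-4o" = "gpt-4o" := by decide
theorem pvL5 : PySem.Str.lower "gpt-4o-mini" = "gpt-4o-mini" := by decide
theorem pvL6 : PySem.Str.lower "gpt-5" = "gpt-5" := by decide
theorem pvL7 : PySem.Str.lower "gpt-5-mini" = "gpt-5-mini" := by decide
theorem pvL8 : PySem.Str.lower "claude-3-opus" = "claude-3-opus" := by decide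
theorem pvL9 : PySem.Str.lower "claude-3-sonnet" = "claude-3-sonnet" := by decide
theorem pvL10 : PySem.Str.lower "claude-3-haiku" = "claude-3-haiku" := by decide
theorem pvL11 : PySem.Str.lower "gemini-pro" = "gemini-pro" := by decide
theorem pvL12 : PySem.Str.lower "gemini-pro-vision" = "gemini-pro-vision" := by decide

theorem pvLowerOf (xs : List Char) :
    PySem.Str.lower (String.ofList xs) = String.ofList (PySem.Chars.lower xs) := by
  simp [PySem.Str.lower]

theorem pvBeqOf (a : List Char) (b : String) : (String.ofList a == b) = (a == b.toList) := by
  by_cases h : a = b.toList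
  · have h1 := String.ofList_eq.mpr h
    simp [h]
  · have h1 : String.ofList a ≠ b := fun e => h (by rw [← e, String.toList_ofList])
    rw [beq_false_of_ne h1, beq_false_of_ne h]

theorem pvSw (xs : List Char) (b : String) :
    PySem.Str.startswith (String.ofList xs) b = List.isPrefixOf b.toList xs := by
  simp [PySem.Str.startswith, PySem.Chars.startswith]

-- core agreement on the split pieces
theorem pvCore (p n : List Char) (hp : '/' ∉ p) :
    pvScanA (String.ofList p) (String.ofList n) pvBlockedCombinations =
      !(pvBlockedFull.any (fun q =>
          PySem.Chars.startswith (PySem.Chars.lower (p ++ '/' :: n)) q.toList)) := by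
  have hlp : '/' ∉ PySem.Chars.lower p := pvSlash_not_mem_lower p hp
  have hFull : ∀ (y b : List Char), '/' ∉ y →
      PySem.Chars.startswith (PySem.Chars.lower (p ++ '/' :: n)) (y ++ '/' :: b)
        = (PySem.Chars.lower p == y && List.isPrefixOf b (PySem.Chars.lower n)) := by
    intro y b hy
    rw [pvLower_join]
    show List.isPrefixOf (y ++ '/' :: b) (PySem.Chars.lower p ++ '/' :: PySem.Chars.lower n) = _
    rw [pvPrefKey y b _ _ hy hlp, Bool.beq_comm]
  have hCond : ∀ (bp bm : String),
      (PySem.Str.lower (String.ofList p) == PySem.Str.lower bp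
        && PySem.Str.startswith (PySem.Str.lower (String.ofList n)) (PySem.Str.lower bm))
      = (PySem.Chars.lower p == (PySem.Str.lower bp).toList
        && List.isPrefixOf (PySem.Str.lower bm).toList (PySem.Chars.lower n)) := by
    intro bp bm
    rw [pvLowerOf p, pvLowerOf n, pvBeqOf, pvSw]
  have e2 : ("gpt-4o-mini" : String).toList = "gpt-4o".toList ++ "-mini".toList := rfl
  have e4 : ("gpt-5-mini" : String).toList = "gpt-5".toList ++ "-mini".toList := rfl
  have e9 : ("gemini-pro-vision" : String).toList = "gemini-pro".toList ++ "-vision".toList := rfl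
  have m2 : List.isPrefixOf ("gpt-4o-mini" : String).toList (PySem.Chars.lower n) = true →
      List.isPrefixOf ("gpt-4o" : String).toList (PySem.Chars.lower n) = true :=
    fun h => pvPref_mono _ _ _ (e2 ▸ h)
  have m4 : List.isPrefixOf ("gpt-5-mini" : String).toList (PySem.Chars.lower n) = true →
      List.isPrefixOf ("gpt-5" : String).toList (PySem.Chars.lower n) = true :=
    fun h => pvPref_mono _ _ _ (e4 ▸ h)
  have m9 : List.isPrefixOf ("gemini-pro-vision" : String).toList (PySem.Chars.lower n) = true →
      List.isPrefixOf ("gemini-pro" : String).toList (PySem.Chars.lower n) = true :=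
    fun h => pvPref_mono _ _ _ (e9 ▸ h)
  have f1 : ("openai/gpt-4o" : String).toList = "openai".toList ++ '/' :: "gpt-4o".toList := rfl
  have f2 : ("openai/gpt-5" : String).toList = "openai".toList ++ '/' :: "gpt-5".toList := rfl
  have f3 : ("anthropic/claude-3-opus" : String).toList
      = "anthropic".toList ++ '/' :: "claude-3-opus".toList := rfl
  have f4 : ("anthropic/claude-3-sonnet" : String).toList
      = "anthropic".toList ++ '/' :: "claude-3-sonnet".toList := rfl
  have f5 : ("anthropic/claude-3-haiku" : String).toList
      = "anthropic".toList ++ '/' :: "claude-3-haiku".toList := rfl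
  have f6 : ("google/gemini-pro" : String).toList
      = "google".toList ++ '/' :: "gemini-pro".toList := rfl
  simp only [pvBlockedCombinations, pvScanA, pvBlockedFull, List.any_cons, List.any_nil]
  rw [hCond, hCond, hCond, hCond, hCond, hCond, hCond, hCond, hCond,
      pvL1, pvL2, pvL3, pvL4, pvL5, pvL6, pvL7, pvL8, pvL9, pvL10, pvL11, pvL12,
      f1, f2, f3, f4, f5, f6,
      hFull _ _ (by decide), hFull _ _ (by decide), hFull _ _ (by decide),
      hFull _ _ (by decide), hFull _ _ (by decide), hFull _ _ (by decide)]
  exact pvChain _ _ _ _ _ _ _ _ _ _ _ _ m2 m4 m9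

-- ===== VERDICT (by name: the statement is the Claim_ definition above) =====
theorem validate_requesty_model_spec : Claim_equal_validate_requesty_model := by
  intro model _
  unfold Spec_validate_requesty_model validate_requesty_model validate_requesty_model_alt
  cases h : PySem.Str.isIn "/" model with
  | false => rfl
  | true =>
    have hm : '/' ∈ model.toList := by
      have := (PySem.Str.isIn_iff_infix (sub := "/") (s := model)).mp h
      simpa using (List.singleton_infix_iff '/' model.toList).mp (by simpa using this)
    obtain ⟨hshape, hp⟩ := pvSplit_shape model.toList hm
    have h1 : ("/" : String).toList = ['/'] := rfl
    have hsplit : PySem.Str.splitMax? model "/" 1 =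
        some [String.ofList (model.toList.takeWhile (· != '/')),
              String.ofList ((model.toList.dropWhile (· != '/')).tail)] := by
      simp only [PySem.Str.splitMax?, PySem.Chars.splitMax?, h1]
      rw [if_neg (by decide)]
      simp only [PySem.Chars.splitOnMax]
      rw [if_neg (by decide)]
      rw [show ((1 : Int).toNat) = 1 from rfl]
      rw [pvGo1 (model.toList.length + 1) model.toList [] [] (by omega)]
      simp [hm]
    rw [hsplit]
    simp only [Bool.not_true, Bool.true_and, if_neg (by simp : ¬ (false = true))]
    rw [pvCore (model.toList.takeWhile (· != '/'))
      ((model.toList.dropWhile (· != '/')).tail) hp]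
    have hlm : PySem.Str.lower model = String.ofList (PySem.Chars.lower
        (model.toList.takeWhile (· != '/') ++ '/' :: (model.toList.dropWhile (· != '/')).tail)) := by
      rw [PySem.Str.lower, ← hshape]
    rw [hlm]
    simp [PySem.Str.startswith]
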